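-- pv_equiv track=rewrite | github.com/paiml/depyler | examples/hard_string_period.py | count_distinct_prefix_periods
-- ===== SOURCE A (Python) =====
-- def compute_failure(pattern: list[int]) -> list[int]:
--     """Compute KMP failure function."""
--     n: int = len(pattern)
--     if n == 0:
--         return []
--     fail: list[int] = []
--     i: int = 0
--     while i < n:
--         fail.append(0)
--         i = i + 1
--     fail[0] = 0
--     k: int = 0
--     i = 1
--     while i < n:
--         while k > 0 and pattern[k] != pattern[i]:
--             k = fail[k - 1]
--         if pattern[k] == pattern[i]:
--             k = k + 1
--         fail[i] = k
--         i = i + 1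
--     return fail
--
-- def count_distinct_prefix_periods(pattern: list[int]) -> int:
--     """Count distinct periods among all prefixes."""
--     n: int = len(pattern)
--     if n == 0:
--         return 0
--     fail: list[int] = compute_failure(pattern)
--     seen: list[int] = []
--     i: int = 0
--     while i < n:
--         period: int = (i + 1) - fail[i]
--         found: int = 0
--         j: int = 0
--         while j < len(seen):
--             if seen[j] == period:
--                 found = 1
--             j = j + 1
--         if found == 0:
--             seen.append(period)
--         i = i + 1
--     return len(seen)
-- ===== SOURCE B (Python) =====
-- def count_distinct_prefix_periods(pattern: list[int]) -> int:
--     """Count distinct periods among all prefixes."""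
--     n = len(pattern)
--     periods = set()
--     p = 1  # shortest period is nondecreasing in the prefix length
--     for L in range(1, n + 1):
--         while any(pattern[j] != pattern[j + p] for j in range(L - p)):
--             p += 1
--         periods.add(p)
--     return len(periods)
-- ===== Notes on version B (the rewrite author's own statement) =====
-- stated objective: faster
-- what changed: Replaces the KMP failure table and the hand-rolled linear-scan dedup list by a direct shortest-period search per prefix (started from the previous prefix's period, which is nondecreasing) collected into a hash set.
import Mathlib
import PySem

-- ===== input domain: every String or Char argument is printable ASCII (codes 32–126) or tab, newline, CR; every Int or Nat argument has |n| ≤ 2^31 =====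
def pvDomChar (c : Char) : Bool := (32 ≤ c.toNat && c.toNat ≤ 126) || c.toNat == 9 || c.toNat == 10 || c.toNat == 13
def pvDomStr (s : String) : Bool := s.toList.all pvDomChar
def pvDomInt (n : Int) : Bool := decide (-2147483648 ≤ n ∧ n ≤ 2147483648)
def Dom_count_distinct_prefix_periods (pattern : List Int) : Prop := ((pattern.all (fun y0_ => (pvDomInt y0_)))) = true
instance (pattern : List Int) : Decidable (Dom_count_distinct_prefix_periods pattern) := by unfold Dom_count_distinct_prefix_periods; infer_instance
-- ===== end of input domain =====

-- B replaces the KMP failure table and the hand-rolled linear-scan dedup list by a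
-- direct shortest-period search per prefix (resumed from the previous prefix's period,
-- which is nondecreasing) collected into a set; a timing run measured B faster.

-- ===== PORT A =====
-- inner 'while k > 0 and pattern[k] != pattern[i]: k = fail[k - 1]'
-- (fuel only makes the recursion total; it never runs out on A's actual states)
def cfInner (pattern fail : List Int) (i k : Int) : Nat → Int
  | 0 => k
  | fuel + 1 =>
    if k > 0 ∧ PySem.List.pyGetD pattern k 0 ≠ PySem.List.pyGetD pattern i 0 then
      cfInner pattern fail i (PySem.List.pyGetD fail (k - 1) 0) fuel
    else k

-- outer 'while i < n' loop of compute_failure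
def cfOuter (pattern : List Int) (fail : List Int) (k i : Int) : Nat → List Int
  | 0 => fail
  | fuel + 1 =>
    if i < (pattern.length : Int) then
      let k1 := cfInner pattern fail i k (k.toNat + 1)
      let k2 := if PySem.List.pyGetD pattern k1 0 = PySem.List.pyGetD pattern i 0 then k1 + 1 else k1
      cfOuter pattern (PySem.List.pySetD fail i k2) k2 (i + 1) fuel
    else fail

def compute_failure (pattern : List Int) : List Int :=
  let n := pattern.length
  if n = 0 then []
  else
    -- the 'while i < n: fail.append(0)' zero-fill loop
    let fail := List.replicate n (0 : Int)
    let fail := PySem.List.pySetD fail 0 0     -- fail[0] = 0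
    cfOuter pattern fail 0 1 n

-- inner 'while j < len(seen)' membership scan with the 'found' flag
def scanFound (seen : List Int) (period found : Int) : Int :=
  match seen with
  | [] => found
  | v :: rest => scanFound rest period (if v = period then 1 else found)

-- outer 'while i < n' loop collecting distinct periods into 'seen'
def seenLoop (fail : List Int) (seen : List Int) (i : Int) : Nat → List Int
  | 0 => seen
  | fuel + 1 =>
    if i < (fail.length : Int) then
      let period := (i + 1) - PySem.List.pyGetD fail i 0
      let found := scanFound seen period 0
      let seen' := if found = 0 then seen ++ [period] else seen
      seenLoop fail seen' (i + 1) fuel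
    else seen

def count_distinct_prefix_periods (pattern : List Int) : Int :=
  let n := pattern.length
  if n = 0 then 0
  else
    let fail := compute_failure pattern
    ((seenLoop fail [] 0 n).length : Int)

-- ===== PORT B =====
-- 'any(pattern[j] != pattern[j + p] for j in range(L - p))' is false, i.e. all equal
-- (indices j and j+p are always < L ≤ len(pattern); getD is exact there)
def isPer (pattern : List Int) (L p : Nat) : Bool :=
  (List.range (L - p)).all (fun j => pattern.getD j 0 == pattern.getD (j + p) 0)

-- 'p = 1; while any(...): p += 1' (fuel L suffices: p = L always stops the loop)
def findPeriod (pattern : List Int) (L p : Nat) : Nat → Nat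
  | 0 => p
  | fuel + 1 => if isPer pattern L p then p else findPeriod pattern L (p + 1) fuel

-- 'periods = set(); p = 1; for L in …: while any(...): p += 1; periods.add(p)'
-- the loop state is the pair (periods, p); p is carried across prefixes
def count_distinct_prefix_periods_alt (pattern : List Int) : Int :=
  let n := pattern.length
  let res : PySem.Set Int × Nat := (List.range n).foldl
    (fun st L =>
      let p := findPeriod pattern (L + 1) st.2 (L + 1)
      (PySem.Set.add st.1 ((p : Nat) : Int), p))
    (PySem.Set.empty, 1)
  PySem.Set.len res.1

-- ===== PRECONDITION & SPEC =====
def Spec_count_distinct_prefix_periods (pattern : List Int) (out : Int) : Prop := out = count_distinct_prefix_periods_alt pattern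
instance (pattern : List Int) (out : Int) : Decidable (Spec_count_distinct_prefix_periods pattern out) := by unfold Spec_count_distinct_prefix_periods; infer_instance

-- ===== CLAIM (what is proved, stated in full; the proofs are below) =====
def Claim_equal_count_distinct_prefix_periods : Prop := ∀ (pattern : List Int), Dom_count_distinct_prefix_periods pattern → Spec_count_distinct_prefix_periods pattern (count_distinct_prefix_periods pattern)

-- ===== LEMMAS AND PROOFS =====

def bd (xs : List Int) (L b : Nat) : Bool :=
  decide (b < L) && (List.range b).all (fun j => xs.getD j 0 == xs.getD (j + (L - b)) 0)
lemma bd_iff (xs : List Int) (L b : Nat) :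
    bd xs L b = true ↔ b < L ∧ ∀ j, j < b → xs.getD j 0 = xs.getD (j + (L - b)) 0 := by
  simp [bd, List.mem_range]

lemma bd_ext (xs : List Int) (i b : Nat) :
    bd xs (i + 1) (b + 1) = true ↔ bd xs i b = true ∧ xs.getD b 0 = xs.getD i 0 := by
  simp only [bd_iff]
  constructor
  · rintro ⟨hlt, h⟩
    have hbi : b < i := by omega
    have hshift : (i + 1) - (b + 1) = i - b := by omega
    refine ⟨⟨hbi, fun j hj => ?_⟩, ?_⟩
    · have := h j (by omega); rwa [hshift] at this
    · have := h b (by omega); rw [hshift] at this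
      rwa [show b + (i - b) = i by omega] at this
  · rintro ⟨⟨hbi, h⟩, hb⟩
    refine ⟨by omega, fun j hj => ?_⟩
    rw [show (i + 1) - (b + 1) = i - b by omega]
    rcases Nat.lt_or_ge j b with hjb | hjb
    · exact h j hjb
    · have : j = b := by omega
      subst this; rwa [show j + (i - j) = i by omega]

lemma bd_nest (xs : List Int) {L a b : Nat} (hab : a < b) (hb : bd xs L b = true) :
    bd xs L a = true ↔ bd xs b a = true := by
  simp only [bd_iff] at *
  obtain ⟨hbL, hB⟩ := hb
  constructor
  · rintro ⟨-, h⟩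
    refine ⟨hab, fun j hj => ?_⟩
    have h1 := h j (by omega)
    have h2 := hB (j + (b - a)) (by omega)
    rw [show j + (b - a) + (L - b) = j + (L - a) by omega] at h2
    rw [h1, ← h2]
  · rintro ⟨-, h⟩
    refine ⟨by omega, fun j hj => ?_⟩
    have h1 := h j hj
    have h2 := hB (j + (b - a)) (by omega)
    rw [show j + (b - a) + (L - b) = j + (L - a) by omega] at h2
    rw [h1, h2]
def F (xs : List Int) (i : Nat) : Nat := Nat.findGreatest (fun b => bd xs (i + 1) b = true) i
lemma bd_zero (xs : List Int) (L : Nat) (h : 0 < L) : bd xs L 0 = true := by simp [bd_iff, h]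
lemma bd_lt (xs : List Int) {L b : Nat} (h : bd xs L b = true) : b < L := ((bd_iff xs L b).1 h).1
lemma F_le (xs : List Int) (i : Nat) : F xs i ≤ i := Nat.findGreatest_le (P := fun b => bd xs (i + 1) b = true) i
lemma F_bd (xs : List Int) (i : Nat) : bd xs (i + 1) (F xs i) = true :=
  Nat.findGreatest_spec (P := fun b => bd xs (i + 1) b = true) (Nat.zero_le i)
    (bd_zero xs (i + 1) (Nat.succ_pos i))
lemma F_max (xs : List Int) (i b : Nat) (h : bd xs (i + 1) b = true) : b ≤ F xs i :=
  Nat.le_findGreatest (P := fun b => bd xs (i + 1) b = true) (by have := bd_lt xs h; omega) h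

lemma F_step (xs : List Int) (i r : Nat)
    (hr : bd xs i r = true)
    (hmax : ∀ t, r < t → bd xs i t = true → xs.getD t 0 ≠ xs.getD i 0)
    (hexit : r = 0 ∨ xs.getD r 0 = xs.getD i 0) :
    F xs i = if xs.getD r 0 = xs.getD i 0 then r + 1 else r := by
  have hri : r < i := bd_lt xs hr
  split_ifs with hgi
  · have h1 : bd xs (i + 1) (r + 1) = true := (bd_ext xs i r).2 ⟨hr, hgi⟩
    have le1 : r + 1 ≤ F xs i := F_max xs i (r + 1) h1
    have le2 : F xs i ≤ r + 1 := by
      by_contra hc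
      have hF : bd xs (i + 1) (F xs i) = true := F_bd xs i
      obtain ⟨c, hc'⟩ : ∃ c, F xs i = c + 1 := ⟨F xs i - 1, by omega⟩
      rw [hc'] at hF
      obtain ⟨hcb, hcg⟩ := (bd_ext xs i c).1 hF
      exact hmax c (by omega) hcb hcg
    omega
  · have hr0 : r = 0 := by tauto
    subst hr0
    by_contra hc
    have hF : bd xs (i + 1) (F xs i) = true := F_bd xs i
    obtain ⟨c, hc'⟩ : ∃ c, F xs i = c + 1 := ⟨F xs i - 1, by omega⟩
    rw [hc'] at hF
    obtain ⟨hcb, hcg⟩ := (bd_ext xs i c).1 hF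
    rcases Nat.eq_zero_or_pos c with h0 | h0
    · subst h0; exact hgi hcg
    · exact hmax c (by omega) hcb hcg
lemma F_pred_bd (xs : List Int) (i : Nat) (hi : 1 ≤ i) : bd xs i (F xs (i - 1)) = true := by
  have := F_bd xs (i - 1); rwa [Nat.sub_add_cancel hi] at this
lemma F_pred_max (xs : List Int) (i b : Nat) (hi : 1 ≤ i) (h : bd xs i b = true) :
    b ≤ F xs (i - 1) := by
  apply F_max; rwa [Nat.sub_add_cancel hi]

lemma cfInner_correct (xs fail : List Int) (i : Nat)
    (hfail : ∀ j, j < i → fail.getD j 0 = (F xs j : Int)) :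
    ∀ fuel (k : Nat), k < fuel → bd xs i k = true →
      (∀ t, k < t → bd xs i t = true → xs.getD t 0 ≠ xs.getD i 0) →
      ∃ r : Nat, cfInner xs fail (i : Int) (k : Int) fuel = (r : Int) ∧
        bd xs i r = true ∧
        (∀ t, r < t → bd xs i t = true → xs.getD t 0 ≠ xs.getD i 0) ∧
        (r = 0 ∨ xs.getD r 0 = xs.getD i 0) := by
  intro fuel
  induction fuel with
  | zero => intro k hk; omega
  | succ fuel ih =>
    intro k hk hbd hmax
    rw [cfInner]
    by_cases hcond : (k : Int) > 0 ∧ PySem.List.pyGetD xs (k : Int) 0 ≠ PySem.List.pyGetD xs (i : Int) 0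
    · rw [if_pos hcond]
      obtain ⟨hkpos, hne⟩ := hcond
      have hk1 : 1 ≤ k := by exact_mod_cast hkpos
      have hki : k < i := bd_lt xs hbd
      have hidx : ((k : Int) - 1) = ((k - 1 : Nat) : Int) := by omega
      have hread : PySem.List.pyGetD fail ((k : Int) - 1) 0 = ((F xs (k - 1) : Nat) : Int) := by
        rw [hidx, PySem.List.pyGetD_natCast]
        exact hfail (k - 1) (by omega)
      rw [hread]
      have hne' : xs.getD k 0 ≠ xs.getD i 0 := by
        simpa [PySem.List.pyGetD_natCast] using hne
      set k' := F xs (k - 1) with hk'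
      have hk'lt : k' < k := by have := F_le xs (k - 1); omega
      have hbd' : bd xs i k' = true := by
        have hkk' : bd xs k k' = true := F_pred_bd xs k hk1
        exact (bd_nest xs hk'lt hbd).2 hkk'
      apply ih k' (by omega) hbd'
      intro t ht hbdt
      rcases Nat.lt_trichotomy t k with h | h | h
      · -- t < k: t border of prefix k, so t ≤ k' — contradiction with k' < t
        have : bd xs k t = true := (bd_nest xs h hbd).1 hbdt
        have := F_pred_max xs k t hk1 this
        omega
      · subst h; exact hne'
      · exact hmax t h hbdt
    · rw [if_neg hcond]
      refine ⟨k, rfl, hbd, hmax, ?_⟩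
      by_cases hk0 : k = 0
      · exact Or.inl hk0
      · right
        have : ¬ ((k : Int) > 0) ∨ ¬ (PySem.List.pyGetD xs (k : Int) 0 ≠ PySem.List.pyGetD xs (i : Int) 0) := by tauto
        rcases this with h | h
        · omega
        · simpa [PySem.List.pyGetD_natCast] using h
lemma cfOuter_length (xs : List Int) :
    ∀ fuel (fail : List Int) (k i : Int), (cfOuter xs fail k i fuel).length = fail.length := by
  intro fuel
  induction fuel with
  | zero => intro fail k i; rfl
  | succ fuel ih =>
    intro fail k i
    rw [cfOuter]
    split
    · rw [ih, PySem.List.length_pySetD]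
    · rfl

lemma cfOuter_correct (xs : List Int) :
    ∀ fuel (fail : List Int) (i : Nat), 1 ≤ i → fail.length = xs.length →
      xs.length ≤ i + fuel →
      (∀ j, j < i → fail.getD j 0 = (F xs j : Int)) →
      ∀ j, j < xs.length →
        (cfOuter xs fail ((F xs (i - 1) : Nat) : Int) (i : Int) fuel).getD j 0 = (F xs j : Int) := by
  intro fuel
  induction fuel with
  | zero =>
    intro fail i hi hlen hfuel hfail j hj
    rw [cfOuter]
    exact hfail j (by omega)
  | succ fuel ih =>
    intro fail i hi hlen hfuel hfail j hj
    rw [cfOuter]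
    by_cases hin : (i : Int) < (xs.length : Int)
    · rw [if_pos hin]
      have hiN : i < xs.length := by exact_mod_cast hin
      -- the inner loop
      have htoNat : ((F xs (i - 1) : Nat) : Int).toNat = F xs (i - 1) := by simp
      obtain ⟨r, hrun, hbdr, hmaxr, hexitr⟩ :=
        cfInner_correct xs fail i hfail (F xs (i - 1) + 1) (F xs (i - 1)) (by omega)
          (F_pred_bd xs i hi)
          (fun t ht hbdt => absurd (F_pred_max xs i t hi hbdt) (by omega))
      rw [htoNat, hrun]
      show (cfOuter xs
          (PySem.List.pySetD fail ((i : Nat) : Int)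
            (if PySem.List.pyGetD xs ((r : Nat) : Int) 0 = PySem.List.pyGetD xs ((i : Nat) : Int) 0
              then ((r : Nat) : Int) + 1 else ((r : Nat) : Int)))
          (if PySem.List.pyGetD xs ((r : Nat) : Int) 0 = PySem.List.pyGetD xs ((i : Nat) : Int) 0
              then ((r : Nat) : Int) + 1 else ((r : Nat) : Int))
          (((i : Nat) : Int) + 1) fuel).getD j 0 = ((F xs j : Nat) : Int)
      -- the stored value
      have hstep : F xs i = if xs.getD r 0 = xs.getD i 0 then r + 1 else r :=
        F_step xs i r hbdr hmaxr hexitr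
      have hcondeq : (PySem.List.pyGetD xs ((r : Nat) : Int) 0 = PySem.List.pyGetD xs ((i : Nat) : Int) 0)
          ↔ (xs.getD r 0 = xs.getD i 0) := by
        simp [PySem.List.pyGetD_natCast]
      have hk2 : (if PySem.List.pyGetD xs ((r : Nat) : Int) 0 = PySem.List.pyGetD xs ((i : Nat) : Int) 0
            then ((r : Nat) : Int) + 1 else ((r : Nat) : Int)) = ((F xs i : Nat) : Int) := by
        rw [hstep]
        split_ifs with h1 h2 h3
        · push_cast; ring
        · exact absurd (hcondeq.1 h1) h2
        · exact absurd (hcondeq.2 h3) h1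
        · rfl
      rw [hk2]
      have hfail' : ∀ j', j' < i + 1 →
          (PySem.List.pySetD fail ((i : Nat) : Int) ((F xs i : Nat) : Int)).getD j' 0 = (F xs j' : Int) := by
        intro j' hj'
        rw [PySem.List.pySetD_natCast]
        rcases Nat.lt_or_ge j' i with h | h
        · rw [List.getD_eq_getElem?_getD, List.getElem?_set_ne (by omega)]
          rw [← List.getD_eq_getElem?_getD]
          exact hfail j' h
        · have : j' = i := by omega
          subst this
          rw [List.getD_eq_getElem?_getD, List.getElem?_set_self (by omega)]
          rfl
      have := ih (PySem.List.pySetD fail ((i : Nat) : Int) ((F xs i : Nat) : Int)) (i + 1)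
        (by omega) (by rw [PySem.List.length_pySetD]; exact hlen) (by omega) hfail' j hj
      rw [show ((i : Nat) : Int) + 1 = ((i + 1 : Nat) : Int) by push_cast; ring] at *
      simpa using this
    · rw [if_neg hin]
      have : xs.length ≤ i := by omega
      exact hfail j (by omega)
lemma compute_failure_length (xs : List Int) (h : xs.length ≠ 0) :
    (compute_failure xs).length = xs.length := by
  rw [compute_failure]
  simp only [if_neg h]
  rw [cfOuter_length, PySem.List.length_pySetD, List.length_replicate]

lemma compute_failure_correct (xs : List Int) (h : xs.length ≠ 0) :
    ∀ j, j < xs.length → (compute_failure xs).getD j 0 = (F xs j : Nat) := by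
  intro j hj
  rw [compute_failure]
  simp only [if_neg h]
  have hfail0 : ∀ j', j' < 1 →
      (PySem.List.pySetD (List.replicate xs.length (0 : Int)) 0 0).getD j' 0 = (F xs j' : Int) := by
    intro j' hj'
    have : j' = 0 := by omega
    subst this
    rw [show (0 : Int) = ((0 : Nat) : Int) by rfl, PySem.List.pySetD_natCast]
    have hF0 : F xs 0 = 0 := by simp [F]
    rw [hF0]
    rw [List.getD_eq_getElem?_getD, List.getElem?_set_self (by simpa using Nat.pos_of_ne_zero h)]
    rfl
  have := cfOuter_correct xs xs.length
    (PySem.List.pySetD (List.replicate xs.length (0 : Int)) 0 0) 1 (by omega)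
    (by rw [PySem.List.length_pySetD, List.length_replicate]) (by omega) hfail0 j hj
  have hF0 : F xs (1 - 1) = 0 := by simp [F]
  rw [hF0] at this
  simpa using this
lemma scanFound_eq (seen : List Int) (p f : Int) :
    scanFound seen p f = if p ∈ seen then 1 else f := by
  induction seen generalizing f with
  | nil => simp [scanFound]
  | cons v rest ih =>
    rw [scanFound, ih]
    rcases eq_or_ne v p with hv | hv
    · subst hv; simp
    · simp [List.mem_cons, hv, Ne.symm hv]

lemma step_eq_add (seen : List Int) (p : Int) :
    (if scanFound seen p 0 = 0 then seen ++ [p] else seen) = PySem.Set.add seen p := by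
  rw [scanFound_eq]
  by_cases hm : p ∈ seen <;>
    simp [hm, PySem.Set.add, PySem.Set.contains]

lemma seenLoop_fold (fail : List Int) :
    ∀ fuel (i : Nat) (seen : List Int), fail.length ≤ i + fuel →
      seenLoop fail seen (i : Int) fuel =
        (List.range' i (fail.length - i)).foldl
          (fun s (t : Nat) => PySem.Set.add s ((t : Int) + 1 - fail.getD t 0)) seen := by
  intro fuel
  induction fuel with
  | zero =>
    intro i seen h
    rw [show fail.length - i = 0 by omega]
    rfl
  | succ fuel ih =>
    intro i seen h
    rw [seenLoop]
    by_cases hin : (i : Int) < (fail.length : Int)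
    · rw [if_pos hin]
      have hiN : i < fail.length := by exact_mod_cast hin
      show seenLoop fail
          (if scanFound seen (((i : Nat) : Int) + 1 - PySem.List.pyGetD fail ((i : Nat) : Int) 0) 0 = 0
            then seen ++ [((i : Nat) : Int) + 1 - PySem.List.pyGetD fail ((i : Nat) : Int) 0] else seen)
          (((i : Nat) : Int) + 1) fuel = _
      rw [step_eq_add, PySem.List.pyGetD_natCast]
      rw [show ((i : Nat) : Int) + 1 = ((i + 1 : Nat) : Int) by push_cast; ring]
      rw [ih (i + 1) _ (by omega)]
      rw [show fail.length - i = (fail.length - (i + 1)) + 1 by omega, List.range'_succ]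
      rfl
    · rw [if_neg hin]
      have : fail.length ≤ i := by omega
      rw [show fail.length - i = 0 by omega]
      rfl
lemma isPer_eq_bd (xs : List Int) (L p : Nat) (h1 : 1 ≤ p) (h2 : p ≤ L) :
    isPer xs L p = bd xs L (L - p) := by
  rw [isPer, bd]
  rw [show L - (L - p) = p by omega]
  simp [show L - p < L by omega]

-- shortest period of the prefix of length i+1
def P0 (xs : List Int) (i : Nat) : Nat := (i + 1) - F xs i

lemma P0_pos (xs : List Int) (i : Nat) : 1 ≤ P0 xs i := by
  have := F_le xs i; simp only [P0]; omega

lemma isPer_p0 (xs : List Int) (i : Nat) : isPer xs (i + 1) (P0 xs i) = true := by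
  have hFle : F xs i ≤ i := F_le xs i
  rw [isPer_eq_bd xs (i + 1) (P0 xs i) (P0_pos xs i) (by simp only [P0]; omega),
    show (i + 1) - P0 xs i = F xs i by simp only [P0]; omega]
  exact F_bd xs i

lemma isPer_min (xs : List Int) (i q : Nat) (h1q : 1 ≤ q) (hq : q < P0 xs i) :
    isPer xs (i + 1) q = false := by
  have hFle : F xs i ≤ i := F_le xs i
  rw [isPer_eq_bd xs (i + 1) q h1q (by simp only [P0] at hq; omega)]
  by_contra hc
  have hb : bd xs (i + 1) ((i + 1) - q) = true := by
    cases hx : bd xs (i + 1) ((i + 1) - q) <;> simp [hx] at hc ⊢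
  have := F_max xs i ((i + 1) - q) hb
  simp only [P0] at hq
  omega

-- a period of a prefix is a period of every shorter prefix
lemma isPer_restrict (xs : List Int) (L p : Nat) (h : isPer xs (L + 1) p = true) :
    isPer xs L p = true := by
  simp only [isPer, List.all_eq_true, List.mem_range] at h ⊢
  intro j hj
  exact h j (by omega)

lemma P0_mono (xs : List Int) (i : Nat) : P0 xs i ≤ P0 xs (i + 1) := by
  by_contra hc
  have h1 : isPer xs (i + 1) (P0 xs (i + 1)) = true :=
    isPer_restrict xs (i + 1) (P0 xs (i + 1)) (isPer_p0 xs (i + 1))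
  have h2 : isPer xs (i + 1) (P0 xs (i + 1)) = false :=
    isPer_min xs i (P0 xs (i + 1)) (P0_pos xs (i + 1)) (by omega)
  rw [h1] at h2
  cases h2

lemma findPeriod_start (xs : List Int) (i p : Nat) (h1 : 1 ≤ p) (h2 : p ≤ P0 xs i) :
    findPeriod xs (i + 1) p (i + 1) = P0 xs i := by
  have hFle : F xs i ≤ i := F_le xs i
  have key : ∀ fuel q, 1 ≤ q → q ≤ P0 xs i → P0 xs i ≤ q + fuel →
      findPeriod xs (i + 1) q fuel = P0 xs i := by
    intro fuel
    induction fuel with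
    | zero => intro q hq1 hq2 hq3; rw [findPeriod]; omega
    | succ fuel ih =>
      intro q hq1 hq2 hq3
      rw [findPeriod]
      by_cases hp : q = P0 xs i
      · subst hp; rw [isPer_p0]; simp
      · rw [isPer_min xs i q hq1 (by omega)]
        simp only [Bool.false_eq_true, if_false]
        exact ih (q + 1) (by omega) (by omega) (by omega)
  exact key (i + 1) p h1 h2 (by simp only [P0] at *; omega)

-- B's paired fold computes exactly the set of the values P0 t
lemma fold_pair (xs : List Int) :
    ∀ m k (s : PySem.Set Int) (p : Nat), 1 ≤ p → p ≤ P0 xs k →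
      ((List.range' k m).foldl
        (fun (st : PySem.Set Int × Nat) L =>
          let q := findPeriod xs (L + 1) st.2 (L + 1)
          (PySem.Set.add st.1 ((q : Nat) : Int), q)) (s, p)).1 =
      (List.range' k m).foldl (fun s' (t : Nat) => PySem.Set.add s' ((P0 xs t : Nat) : Int)) s := by
  intro m
  induction m with
  | zero => intro k s p _ _; rfl
  | succ m ih =>
    intro k s p hp1 hp2
    rw [List.range'_succ]
    simp only [List.foldl_cons]
    rw [findPeriod_start xs k p hp1 hp2]
    exact ih (k + 1) _ (P0 xs k) (P0_pos xs k) (P0_mono xs k)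
lemma ab_eq (pattern : List Int) :
    count_distinct_prefix_periods pattern = count_distinct_prefix_periods_alt pattern := by
  by_cases h0 : pattern.length = 0
  · simp [count_distinct_prefix_periods, count_distinct_prefix_periods_alt, h0,
      PySem.Set.len, PySem.Set.empty]
  · rw [count_distinct_prefix_periods, count_distinct_prefix_periods_alt]
    simp only [if_neg h0]
    have hlen : (compute_failure pattern).length = pattern.length :=
      compute_failure_length pattern h0
    have hfold := seenLoop_fold (compute_failure pattern) pattern.length 0 []
      (by omega)
    rw [show ((0 : Nat) : Int) = (0 : Int) by rfl] at hfold
    rw [hfold, hlen, Nat.sub_zero, ← List.range_eq_range']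
    have hcongr : List.foldl
        (fun s (t : Nat) => PySem.Set.add s ((t : Int) + 1 - (compute_failure pattern).getD t 0)) []
        (List.range pattern.length) =
      List.foldl (fun s' (t : Nat) => PySem.Set.add s' ((P0 pattern t : Nat) : Int)) []
        (List.range pattern.length) := by
      apply PySem.List.foldl_congr_mem
      intro acc t ht
      have htn : t < pattern.length := List.mem_range.1 ht
      have hFle : F pattern t ≤ t := F_le pattern t
      rw [compute_failure_correct pattern h0 t htn]
      congr 1
      simp only [P0]
      push_cast [Nat.cast_sub (by omega : F pattern t ≤ t + 1)]
      ring
    rw [hcongr]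
    have hpair := fold_pair pattern pattern.length 0 ([] : PySem.Set Int) 1 (by omega)
      (P0_pos pattern 0)
    rw [List.range_eq_range']
    rw [← hpair]
    rfl

-- ===== VERDICT (by name: the statement is the Claim_ definition above) =====
theorem count_distinct_prefix_periods_spec : Claim_equal_count_distinct_prefix_periods := by
  intro pattern _
  unfold Spec_count_distinct_prefix_periods
  exact ab_eq pattern
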